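-- pv_equiv track=rewrite | github.com/reshinto/Basic_technologies_revision | interviewPrep/system_design/23MapReduce/example2/python/syncExample.py | group_by_word
-- ===== SOURCE A (Python) =====
-- def group_by_word(mapped_word_counts):
--     grouped = {}
--     for word_count in mapped_word_counts:
--         word = word_count["word_text"]
--         if word not in grouped:
--             grouped[word] = []
--         grouped[word].append(word_count["count_one"])
--     return grouped
-- ===== SOURCE B (Python) =====
-- def group_by_word(mapped_word_counts):
--     words = dict.fromkeys(wc["word_text"] for wc in mapped_word_counts)
--     return {w: [wc["count_one"] for wc in mapped_word_counts
--                 if wc["word_text"] == w]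
--             for w in words}
-- ===== Notes on version B (the rewrite author's own statement) =====
-- stated objective: alternative
-- what changed: Replaces the incremental dict-of-lists accumulation with a two-phase decomposition: first collect the distinct words in first-occurrence order with dict.fromkeys, then build each word's count list by a per-word filtering comprehension.
import Mathlib
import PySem

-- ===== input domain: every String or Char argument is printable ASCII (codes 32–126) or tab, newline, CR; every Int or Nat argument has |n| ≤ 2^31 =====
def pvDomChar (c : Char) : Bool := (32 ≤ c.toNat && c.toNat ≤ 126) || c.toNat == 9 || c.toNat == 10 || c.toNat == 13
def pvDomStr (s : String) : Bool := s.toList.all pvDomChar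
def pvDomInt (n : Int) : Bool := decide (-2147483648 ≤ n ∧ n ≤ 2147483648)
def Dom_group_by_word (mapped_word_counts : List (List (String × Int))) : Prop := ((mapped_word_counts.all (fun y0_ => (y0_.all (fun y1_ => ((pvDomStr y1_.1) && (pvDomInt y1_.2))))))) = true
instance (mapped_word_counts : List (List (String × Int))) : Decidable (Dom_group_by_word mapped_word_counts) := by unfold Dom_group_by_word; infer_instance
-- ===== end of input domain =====

-- B replaces A's incremental dict-of-lists accumulation with a two-phase decomposition
-- (distinct words in first-occurrence order, then a per-word filtering pass); alternative structure, not faster.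


-- ===== PORT A =====
-- shared lookup helpers: word_count["word_text"] / word_count["count_one"] as first-match
-- assoc-list lookup; Pre_ guarantees the key is present, so the .getD 0 default is never reached
-- on admitted inputs (Python raises KeyError exactly where the lookup is none).
def pvWord (word_count : List (String × Int)) : Int :=
  ((PySem.Dict.mk word_count).get? "word_text").getD 0

def pvCount (word_count : List (String × Int)) : Int :=
  ((PySem.Dict.mk word_count).get? "count_one").getD 0

def group_by_word (mapped_word_counts : List (List (String × Int))) : List (Int × List Int) :=
  (mapped_word_counts.foldl
    (fun (grouped : PySem.Dict Int (List Int)) word_count =>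
      let word := pvWord word_count
      let grouped := if grouped.contains word then grouped else grouped.insert word []
      grouped.modify word [] (fun l => l ++ [pvCount word_count]))
    PySem.Dict.empty).items

-- ===== PORT B =====
def group_by_word_alt (mapped_word_counts : List (List (String × Int))) : List (Int × List Int) :=
  (PySem.List.dedup (mapped_word_counts.map pvWord)).map
    (fun w => (w, (mapped_word_counts.filter (fun wc => pvWord wc == w)).map pvCount))

-- ===== PRECONDITION & SPEC =====
-- Pre_ excludes exactly the inputs where some element dict lacks the key "word_text" or
-- "count_one": there the Python A raises KeyError and returns nothing.
def Pre_group_by_word (mapped_word_counts : List (List (String × Int))) : Prop :=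
  ∀ wc ∈ mapped_word_counts, "word_text" ∈ wc.map Prod.fst ∧ "count_one" ∈ wc.map Prod.fst
instance (mapped_word_counts : List (List (String × Int))) : Decidable (Pre_group_by_word mapped_word_counts) := by unfold Pre_group_by_word; infer_instance

def pvWitness_group_by_word : (List (List (String × Int))) :=
  [[("word_text", 1), ("count_one", 2)], [("word_text", 1), ("count_one", 3)]]

def Spec_group_by_word (mapped_word_counts : List (List (String × Int))) (out : List (Int × List Int)) : Prop := out = group_by_word_alt mapped_word_counts
instance (mapped_word_counts : List (List (String × Int))) (out : List (Int × List Int)) : Decidable (Spec_group_by_word mapped_word_counts out) := by unfold Spec_group_by_word; infer_instance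

-- ===== CLAIM (what is proved, stated in full; the proofs are below) =====
def Claim_equal_group_by_word : Prop := ∀ (mapped_word_counts : List (List (String × Int))), Dom_group_by_word mapped_word_counts → Pre_group_by_word mapped_word_counts → Spec_group_by_word mapped_word_counts (group_by_word mapped_word_counts)

-- ===== LEMMAS AND PROOFS =====

-- A's loop body on one element: inserting [] for a fresh key and then appending
-- is the same single `modify` with default [].
theorem pvStep_eq_modify (d : PySem.Dict Int (List Int)) (k c : Int) :
    (if d.contains k then d else d.insert k []).modify k [] (fun l => l ++ [c])
      = d.modify k [] (fun l => l ++ [c]) := by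
  by_cases h : d.contains k
  · simp [h]
  · simp [h, PySem.Dict.modify, PySem.Dict.getD_insert_self,
      PySem.Dict.insert_insert_self, PySem.Dict.getD_of_not_contains]

-- A's whole loop is the plain modify-append fold.
theorem pvFold_eq (mcs : List (List (String × Int))) (d : PySem.Dict Int (List Int)) :
    mcs.foldl
      (fun (grouped : PySem.Dict Int (List Int)) wc =>
        let word := pvWord wc
        let grouped := if grouped.contains word then grouped else grouped.insert word []
        grouped.modify word [] (fun l => l ++ [pvCount wc]))
      d
    = mcs.foldl (fun d wc => d.modify (pvWord wc) [] (fun l => l ++ [pvCount wc])) d := by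
  simp only [pvStep_eq_modify]

-- ===== VERDICT (by name: the statement is the Claim_ definition above) =====
theorem group_by_word_spec : Claim_equal_group_by_word := by
  intro mcs _hdom _hpre
  unfold Spec_group_by_word group_by_word group_by_word_alt
  rw [pvFold_eq]
  set F := fun (d : PySem.Dict Int (List Int)) wc =>
    d.modify (pvWord wc) [] (fun l => l ++ [pvCount wc]) with hF
  have hnd : (mcs.foldl F PySem.Dict.empty).keys.Nodup := by
    exact PySem.Dict.nodup_keys_foldl_modify_key mcs pvWord []
      (fun _ wc => fun l => l ++ [pvCount wc]) PySem.Dict.empty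
      (by simp)
  have hkeys : (mcs.foldl F PySem.Dict.empty).keys = PySem.List.dedup (mcs.map pvWord) := by
    rw [hF, PySem.Dict.keys_foldl_modify_key]
    simp [PySem.Dict.keys_empty, PySem.Set.update_nil_left, PySem.List.dedup_eq_ofList]
  have hgetD : ∀ k, (mcs.foldl F PySem.Dict.empty).getD k []
      = (mcs.filter (fun wc => pvWord wc == k)).map pvCount := by
    intro k
    have hm : mcs.foldl F PySem.Dict.empty
        = (mcs.map (fun wc => (pvWord wc, pvCount wc))).foldl
            (fun d p => d.modify p.1 [] (fun l => l ++ [p.2])) PySem.Dict.empty := by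
      rw [List.foldl_map]
    rw [hm, PySem.Dict.getD_foldl_modify_append]
    simp [PySem.Dict.getD_empty, List.filter_map, Function.comp_def]
  rw [PySem.Dict.items_eq_map_keys _ hnd [], hkeys]
  refine List.map_congr_left ?_
  intro w _
  rw [hgetD w]
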